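-- pv_equiv track=rewrite | github.com/kjwong/voice-comparison | scripts/declick_mp3.py | find_click_regions
-- ===== SOURCE A (Python) =====
-- def find_click_regions(samples, threshold: int, gap_tolerance: int = 5):
--     """Yield (start_sample, end_sample) inclusive for each contiguous click region.
--
--     A region grows while inter-sample deltas exceed threshold; it terminates after
--     `gap_tolerance` consecutive clean samples, so adjacent micro-clicks merge.
--     """
--     n = len(samples)
--     region_start = None
--     last_dirty = None
--     for i in range(1, n):
--         if abs(samples[i] - samples[i - 1]) > threshold:
--             if region_start is None:
--                 region_start = i
--             last_dirty = i
--         elif region_start is not None and i - last_dirty > gap_tolerance: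
--             yield region_start, last_dirty
--             region_start = None
--             last_dirty = None
--     if region_start is not None:
--         yield region_start, last_dirty
-- ===== SOURCE B (Python) =====
-- def find_click_regions(samples, threshold: int, gap_tolerance: int = 5):
--     """Filter-then-group: collect every dirty index (sample delta above the
--     threshold), then split that list into regions wherever consecutive dirty
--     indices are separated by more clean samples than the tolerance allows."""
--     gap_tolerance = max(gap_tolerance, 0)  # a negative tolerance means zero tolerance
--     dirty = [i for i in range(1, len(samples))
--              if abs(samples[i] - samples[i - 1]) > threshold]
--     if not dirty:
--         return
--     start = prev = dirty[0]
--     for d in dirty[1:]: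
--         if d - prev > gap_tolerance + 1:
--             yield start, prev
--             start = d
--         prev = d
--     yield start, prev
-- ===== Notes on version B (the rewrite author's own statement) =====
-- stated objective: alternative
-- what changed: Replaces A's single-pass three-variable state machine over all samples by a filter-then-group decomposition: first list the dirty indices, then split that list into regions wherever consecutive dirty indices are separated by more clean samples than the tolerance allows (a negative tolerance is clamped to zero, which is what A's state machine effectively does).
import Mathlib
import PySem

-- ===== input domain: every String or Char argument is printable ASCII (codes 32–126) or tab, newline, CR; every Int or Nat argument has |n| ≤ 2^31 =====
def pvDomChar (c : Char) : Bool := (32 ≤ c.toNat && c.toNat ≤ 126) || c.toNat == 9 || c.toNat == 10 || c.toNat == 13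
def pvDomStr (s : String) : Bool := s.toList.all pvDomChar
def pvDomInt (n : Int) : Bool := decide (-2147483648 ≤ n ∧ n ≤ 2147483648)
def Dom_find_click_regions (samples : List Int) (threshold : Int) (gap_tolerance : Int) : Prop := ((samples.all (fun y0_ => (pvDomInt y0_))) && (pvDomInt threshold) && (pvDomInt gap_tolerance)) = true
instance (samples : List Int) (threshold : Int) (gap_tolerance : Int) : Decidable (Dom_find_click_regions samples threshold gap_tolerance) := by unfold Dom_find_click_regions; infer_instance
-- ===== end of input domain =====

-- B replaces A's one-pass state machine with a filter-then-group decomposition (same O(n) cost); equivalence of the yielded sequences is proved.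

-- shared: is index i a "dirty" sample boundary (|samples[i]-samples[i-1]| > threshold)?
def pvDirty (samples : List Int) (threshold : Int) (i : Int) : Bool :=
  threshold < |PySem.List.pyGetD samples i 0 - PySem.List.pyGetD samples (i - 1) 0|

-- ===== PORT A =====
-- one iteration of A's for-loop body on the state (region_start, last_dirty, yields-so-far)
def pvAStep (samples : List Int) (threshold : Int) (gap_tolerance : Int)
    (st : Option Int × Option Int × List (Int × Int)) (i : Int) :
    Option Int × Option Int × List (Int × Int) :=
  let (region_start, last_dirty, out) := st
  if pvDirty samples threshold i then
    ((match region_start with | none => some i | some r => some r), some i, out)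
  else if region_start.isSome = true ∧ gap_tolerance < i - last_dirty.getD 0 then
    (none, none, out ++ [(region_start.getD 0, last_dirty.getD 0)])
  else
    (region_start, last_dirty, out)

-- A's trailing 'if region_start is not None: yield region_start, last_dirty'
def pvFin (st : Option Int × Option Int × List (Int × Int)) : List (Int × Int) :=
  match st with
  | (some r, ld, out) => out ++ [(r, ld.getD 0)]
  | (none, _, out) => out

def find_click_regions (samples : List Int) (threshold : Int) (gap_tolerance : Int) : List (Int × Int) :=
  pvFin ((PySem.List.pyRange 1 (samples.length : Int) 1).foldl
    (pvAStep samples threshold gap_tolerance) (none, none, []))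

-- ===== PORT B =====
-- one iteration of B's for-loop body on the state (start, prev, yields-so-far)
def pvBStep (gap_tolerance : Int) (st : Int × Int × List (Int × Int)) (d : Int) :
    Int × Int × List (Int × Int) :=
  let (start, prev, out) := st
  if gap_tolerance + 1 < d - prev then (d, d, out ++ [(start, prev)])
  else (start, d, out)

def find_click_regions_alt (samples : List Int) (threshold : Int) (gap_tolerance : Int) : List (Int × Int) :=
  let g := max gap_tolerance 0
  let dirty := (PySem.List.pyRange 1 (samples.length : Int) 1).filter (pvDirty samples threshold)
  match dirty with
  | [] => []
  | d0 :: rest =>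
    let st := rest.foldl (pvBStep g) (d0, d0, [])
    st.2.2 ++ [(st.1, st.2.1)]

-- ===== PRECONDITION & SPEC =====
def Spec_find_click_regions (samples : List Int) (threshold : Int) (gap_tolerance : Int) (out : List (Int × Int)) : Prop := out = find_click_regions_alt samples threshold gap_tolerance
instance (samples : List Int) (threshold : Int) (gap_tolerance : Int) (out : List (Int × Int)) : Decidable (Spec_find_click_regions samples threshold gap_tolerance out) := by unfold Spec_find_click_regions; infer_instance

-- ===== CLAIM (what is proved, stated in full; the proofs are below) =====
def Claim_equal_find_click_regions : Prop := ∀ (samples : List Int) (threshold : Int) (gap_tolerance : Int), Dom_find_click_regions samples threshold gap_tolerance → Spec_find_click_regions samples threshold gap_tolerance (find_click_regions samples threshold gap_tolerance)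

-- ===== LEMMAS AND PROOFS =====

-- grouping of a dirty-index list, continuation style (proof-side characterisation of B)
def pvGroup (g : Int) (s p : Int) (ds : List Int) : List (Int × Int) :=
  match ds with
  | [] => [(s, p)]
  | d :: ds => if g + 1 < d - p then (s, p) :: pvGroup g d d ds
               else pvGroup g s d ds

def pvWhole (g : Int) (ds : List Int) : List (Int × Int) :=
  match ds with
  | [] => []
  | d :: ds => pvGroup g d d ds

theorem pvB_bridge (g : Int) (ds : List Int) : ∀ (s p : Int) (o : List (Int × Int)),
    (ds.foldl (pvBStep g) (s, p, o)).2.2 ++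
      [((ds.foldl (pvBStep g) (s, p, o)).1, (ds.foldl (pvBStep g) (s, p, o)).2.1)]
      = o ++ pvGroup g s p ds := by
  induction ds with
  | nil => intro s p o; simp [pvGroup]
  | cons d ds ih =>
    intro s p o
    simp only [List.foldl_cons, pvBStep, pvGroup]
    by_cases h : g + 1 < d - p
    · simp only [if_pos h, ih]; simp
    · simp only [if_neg h, ih]

theorem pvGroup_shift (g : Int) (s p : Int) (ds : List Int)
    (h : ∀ d ∈ ds, g + 1 < d - p) :
    pvGroup g s p ds = (s, p) :: pvWhole g ds := by
  cases ds with
  | nil => simp [pvGroup, pvWhole]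
  | cons d ds =>
    have := h d (by simp)
    simp [pvGroup, pvWhole, this]

theorem pvMain (samples : List Int) (θ g : Int) :
    ∀ (k : Nat) (a b : Int), b ≤ a + (k : Int) →
      (∀ out, pvFin (((PySem.List.pyRange a b 1).foldl (pvAStep samples θ g) (none, none, out)))
          = out ++ pvWhole (max g 0) ((PySem.List.pyRange a b 1).filter (pvDirty samples θ))) ∧
      (∀ s p out, (a = p + 1 ∨ (p < a ∧ a - 1 - p ≤ g)) →
        pvFin (((PySem.List.pyRange a b 1).foldl (pvAStep samples θ g) (some s, some p, out)))
          = out ++ pvGroup (max g 0) s p ((PySem.List.pyRange a b 1).filter (pvDirty samples θ))) := by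
  intro k
  induction k with
  | zero =>
    intro a b hab
    rw [PySem.List.pyRange_one_eq_nil (by omega)]
    exact ⟨fun out => by simp [pvFin, pvWhole],
           fun s p out _ => by simp [pvFin, pvGroup]⟩
  | succ k ih =>
    intro a b hab
    by_cases hb : b ≤ a
    · rw [PySem.List.pyRange_one_eq_nil hb]
      exact ⟨fun out => by simp [pvFin, pvWhole],
             fun s p out _ => by simp [pvFin, pvGroup]⟩
    · rw [PySem.List.pyRange_one_cons (by omega)]
      have ih' := ih (a + 1) b (by omega)
      constructor
      · intro out
        simp only [List.foldl_cons, List.filter_cons]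
        by_cases hd : pvDirty samples θ a
        · simp only [pvAStep, hd, if_true]
          rw [(ih'.2) a a out (Or.inl rfl)]
          simp [pvWhole]
        · simp only [pvAStep, hd, Bool.false_eq_true, if_false, Option.isSome_none,
            false_and]
          rw [(ih'.1) out]
      · intro s p out hsp
        simp only [List.foldl_cons, List.filter_cons]
        by_cases hd : pvDirty samples θ a
        · simp only [pvAStep, hd, if_true]
          rw [(ih'.2) s a out (Or.inl rfl)]
          have hnosplit : ¬ (max g 0 + 1 < a - p) := by
            rcases hsp with h1 | h2 <;> omega
          simp [pvGroup, hnosplit]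
        · have hpa : p < a := by rcases hsp with h1 | h2 <;> omega
          simp only [pvAStep, hd, Bool.false_eq_true, if_false, Option.isSome_some,
            Option.getD_some, true_and]
          by_cases hc : g < a - p
          · rw [if_pos hc, (ih'.1) (out ++ [(s, p)]),
              pvGroup_shift (max g 0) s p _ ?_]
            · simp
            · intro d hdmem
              have : d ∈ PySem.List.pyRange (a + 1) b 1 := List.mem_of_mem_filter hdmem
              have := (PySem.List.mem_pyRange_one).1 this
              omega
          · rw [if_neg hc, (ih'.2) s p out (Or.inr ⟨by omega, by omega⟩)]

theorem find_click_regions_alt_eq (samples : List Int) (θ g : Int) :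
    find_click_regions_alt samples θ g
      = pvWhole (max g 0) ((PySem.List.pyRange 1 (samples.length : Int) 1).filter (pvDirty samples θ)) := by
  unfold find_click_regions_alt
  rcases hfil : (PySem.List.pyRange 1 (samples.length : Int) 1).filter (pvDirty samples θ)
    with _ | ⟨d0, rest⟩
  · simp [pvWhole]
  · simp only [pvWhole]
    rw [pvB_bridge (max g 0) rest d0 d0 []]
    simp

theorem find_click_regions_eq (samples : List Int) (θ g : Int) :
    find_click_regions samples θ g = find_click_regions_alt samples θ g := by
  have h := (pvMain samples θ g ((samples.length : Int) - 1).toNat 1 (samples.length : Int)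
      (by omega)).1 []
  simp only [List.nil_append] at h
  rw [find_click_regions, h, find_click_regions_alt_eq]

-- ===== VERDICT (by name: the statement is the Claim_ definition above) =====
theorem find_click_regions_spec : Claim_equal_find_click_regions := by
  intro samples threshold gap_tolerance _
  unfold Spec_find_click_regions
  exact find_click_regions_eq samples threshold gap_tolerance
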